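-- pv_equiv track=rewrite | github.com/polirritmico/codesignal_solutions | Python/areSimilarB.py | solution
-- ===== SOURCE A (Python) =====
-- def solution(array_a, array_b):
--     a_dict = dict()
--     b_dict = dict()
--     diff_counter = 0
--     for a, b in zip(array_a, array_b):
--         if a != b:
--             a_dict[a] = a_dict.get(a, 0) + 1
--             b_dict[b] = b_dict.get(b, 0) + 1
--             diff_counter += 1
--             if diff_counter > 2:
--                 return False
--     if len(a_dict) == 0:
--         return True
--     for a in a_dict:
--         if a not in b_dict or a_dict[a] - b_dict[a] != 0:
--             return False
--     return True
-- ===== SOURCE B (Python) =====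
-- def solution(array_a, array_b):
--     diffs = [(a, b) for a, b in zip(array_a, array_b) if a != b]
--     if len(diffs) == 0:
--         return True
--     if len(diffs) != 2:
--         return False
--     (a1, b1), (a2, b2) = diffs
--     return a1 == b2 and a2 == b1
-- ===== Notes on version B (the rewrite author's own statement) =====
-- stated objective: simpler
-- what changed: Replaces A's two incrementally built count-dicts with early-exit counter and a post-hoc multiset comparison by a single pass collecting the differing pairs and a direct length-plus-swap test.
import Mathlib
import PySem

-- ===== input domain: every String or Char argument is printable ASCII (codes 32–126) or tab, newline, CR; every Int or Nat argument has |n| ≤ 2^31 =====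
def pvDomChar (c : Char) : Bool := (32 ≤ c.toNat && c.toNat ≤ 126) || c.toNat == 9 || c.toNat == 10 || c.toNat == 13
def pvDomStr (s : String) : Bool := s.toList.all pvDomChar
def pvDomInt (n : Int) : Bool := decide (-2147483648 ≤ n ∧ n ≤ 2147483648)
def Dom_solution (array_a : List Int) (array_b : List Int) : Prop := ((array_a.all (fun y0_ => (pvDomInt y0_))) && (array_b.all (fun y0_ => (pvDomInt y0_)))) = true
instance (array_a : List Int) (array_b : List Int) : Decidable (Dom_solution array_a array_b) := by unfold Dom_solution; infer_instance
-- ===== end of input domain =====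

-- B replaces A's two count-dicts + early-exit counter by collecting the differing pairs and a direct length-plus-swap test (objective: simpler).

-- ===== PORT A =====
-- the for-loop with its early returns; on exhaustion, the two final checks of A
def solLoop : List (Int × Int) → PySem.Dict Int Int → PySem.Dict Int Int → Int → Bool
  | [], a_dict, b_dict, _ =>
      if a_dict.size = 0 then true
      else a_dict.keys.all (fun a =>
        b_dict.contains a && decide (a_dict.getD a 0 - b_dict.getD a 0 = 0))
  | (a, b) :: rest, a_dict, b_dict, diff_counter =>
      if a ≠ b then
        let a_dict' := a_dict.insert a (a_dict.getD a 0 + 1)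
        let b_dict' := b_dict.insert b (b_dict.getD b 0 + 1)
        let c' := diff_counter + 1
        if c' > 2 then false else solLoop rest a_dict' b_dict' c'
      else solLoop rest a_dict b_dict diff_counter

def solution (array_a : List Int) (array_b : List Int) : Bool :=
  solLoop (array_a.zip array_b) PySem.Dict.empty PySem.Dict.empty 0

-- ===== PORT B =====
def solution_alt (array_a : List Int) (array_b : List Int) : Bool :=
  let diffs := (array_a.zip array_b).filter (fun p => p.1 ≠ p.2)
  match diffs with
  | [] => true
  | [(a1, b1), (a2, b2)] => a1 = b2 && a2 = b1
  | _ => false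

-- ===== PRECONDITION & SPEC =====
def Spec_solution (array_a : List Int) (array_b : List Int) (out : Bool) : Prop := out = solution_alt array_a array_b
instance (array_a : List Int) (array_b : List Int) (out : Bool) : Decidable (Spec_solution array_a array_b out) := by unfold Spec_solution; infer_instance

-- ===== CLAIM (what is proved, stated in full; the proofs are below) =====
def Claim_equal_solution : Prop := ∀ (array_a : List Int) (array_b : List Int), Dom_solution array_a array_b → Spec_solution array_a array_b (solution array_a array_b)

-- ===== LEMMAS AND PROOFS =====

-- pairs with equal components are skipped by the loop: it only sees the differing pairs
theorem solLoop_filter (zs : List (Int × Int)) (aD bD : PySem.Dict Int Int) (c : Int) :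
    solLoop zs aD bD c = solLoop (zs.filter (fun p => p.1 ≠ p.2)) aD bD c := by
  induction zs generalizing aD bD c with
  | nil => rfl
  | cons p rest ih =>
    obtain ⟨a, b⟩ := p
    by_cases h : a = b
    · simp [solLoop, h, ih]
    · simp only [ne_eq, decide_not] at ih ⊢
      simp only [List.filter_cons, solLoop, h, decide_false, Bool.not_false, if_true,
        ite_not, if_false]
      split
      · rfl
      · exact ih _ _ _

theorem solLoop_two (a1 b1 a2 b2 : Int) (h1 : a1 ≠ b1) (h2 : a2 ≠ b2) :
    solLoop [(a1, b1), (a2, b2)] PySem.Dict.empty PySem.Dict.empty 0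
      = (decide (a1 = b2) && decide (a2 = b1)) := by
  by_cases e : a1 = a2 <;> by_cases f : b1 = b2 <;> by_cases g : a1 = b2 <;> by_cases k : a2 = b1 <;>
    simp_all [solLoop, PySem.Dict.insert, PySem.Dict.empty, PySem.Dict.getD,
      PySem.Dict.get?, PySem.Dict.contains, PySem.Dict.size, PySem.Dict.keys,
      List.find?, Ne.symm, beq_iff_eq, Option.map, Option.getD]
  rw [show (b1 == b2) = false from by simp [f], show (b2 == b1) = false from by simp [Ne.symm f]]
  norm_num

-- ===== VERDICT (by name: the statement is the Claim_ definition above) =====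
theorem solution_spec : Claim_equal_solution := by
  intro array_a array_b _
  unfold Spec_solution solution solution_alt
  rw [solLoop_filter]
  have hmem : ∀ p ∈ (array_a.zip array_b).filter (fun p => p.1 ≠ p.2), p.1 ≠ p.2 := by
    intro p hp
    simpa using (List.of_mem_filter hp)
  rcases hd : (array_a.zip array_b).filter (fun p => p.1 ≠ p.2) with _ | ⟨⟨a1, b1⟩, _ | ⟨⟨a2, b2⟩, _ | ⟨⟨a3, b3⟩, t⟩⟩⟩
  · rw [hd]; rfl
  · rw [hd] at hmem ⊢
    have h1 : a1 ≠ b1 := hmem (a1, b1) (by simp)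
    simp [solLoop, h1, PySem.Dict.insert, PySem.Dict.empty, PySem.Dict.getD,
      PySem.Dict.get?, PySem.Dict.contains, PySem.Dict.size, PySem.Dict.keys,
      h1.symm]
  · rw [hd] at hmem ⊢
    have h1 : a1 ≠ b1 := hmem (a1, b1) (by simp)
    have h2 : a2 ≠ b2 := hmem (a2, b2) (by simp)
    simpa using solLoop_two a1 b1 a2 b2 h1 h2
  · rw [hd] at hmem ⊢
    have h1 : a1 ≠ b1 := hmem (a1, b1) (by simp)
    have h2 : a2 ≠ b2 := hmem (a2, b2) (by simp)
    have h3 : a3 ≠ b3 := hmem (a3, b3) (by simp)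
    simp [solLoop, h1, h2, h3]
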